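-- pv_equiv track=rewrite | github.com/thepycoder/projectwhy-tts | src/projectwhy/core/plain_qt.py | _drop_inline_paren_gaps
-- ===== SOURCE A (Python) =====
-- def _drop_inline_paren_gaps(norm: str, pos_map: list[int]) -> tuple[str, list[int]]:
--     """Remove spaces after '(' like QTextBrowser; keep index map aligned."""
--     out: list[str] = []
--     omap: list[int] = []
--     i = 0
--     n = len(norm)
--     while i < n:
--         if i + 1 < n and norm[i] == "(" and norm[i + 1] == " ":
--             j = i + 1
--             while j < n and norm[j] == " ":
--                 j += 1
--             if j < n:
--                 out.append("(")
--                 omap.append(pos_map[i])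
--                 i = j
--                 continue
--         out.append(norm[i])
--         omap.append(pos_map[i])
--         i += 1
--     return "".join(out), omap
-- ===== SOURCE B (Python) =====
-- def _drop_inline_paren_gaps(norm: str, pos_map: list[int]) -> tuple[str, list[int]]:
--     """Mark-then-filter: forward DP marks spaces whose run is preceded by '(',
--     then unmark the trailing space run, then rebuild by filtering."""
--     n = len(norm)
--     fwd = []
--     prev_c, prev_d = "\x00", False
--     for c in norm:
--         d = (c == " ") and (prev_c == "(" or prev_d)
--         fwd.append(d)
--         prev_c, prev_d = c, d
--     t = n
--     while t > 0 and norm[t - 1] == " ":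
--         t -= 1
--     drop = [fwd[k] and k < t for k in range(n)]
--     out = "".join(norm[k] for k in range(n) if not drop[k])
--     omap = [pos_map[k] for k in range(n) if not drop[k]]
--     return out, omap
-- ===== Notes on version B (the rewrite author's own statement) =====
-- stated objective: alternative
-- what changed: A's single streaming scan with an inner space-skipping loop and continue is replaced by a mark-then-filter decomposition: a forward pass marks spaces reachable from a '(' through a space run, a backward trim unmarks the trailing space run, and the output is rebuilt by filtering the unmarked indices.
import Mathlib
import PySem

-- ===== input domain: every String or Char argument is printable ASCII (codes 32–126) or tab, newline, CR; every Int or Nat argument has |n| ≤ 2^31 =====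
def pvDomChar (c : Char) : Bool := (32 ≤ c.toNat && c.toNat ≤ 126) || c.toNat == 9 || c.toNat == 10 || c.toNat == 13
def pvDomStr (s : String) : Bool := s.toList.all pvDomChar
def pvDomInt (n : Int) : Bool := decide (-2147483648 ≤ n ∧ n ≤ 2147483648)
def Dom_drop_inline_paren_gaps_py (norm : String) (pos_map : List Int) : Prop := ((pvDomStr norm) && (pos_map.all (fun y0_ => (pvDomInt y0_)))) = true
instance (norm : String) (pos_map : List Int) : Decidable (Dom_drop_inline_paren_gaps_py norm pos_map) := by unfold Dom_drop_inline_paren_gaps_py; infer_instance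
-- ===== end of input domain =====

-- B replaces A's streaming scan (with an inner skip loop and `continue`) by a mark-then-filter
-- decomposition: a forward DP marking droppable spaces, a backward trim of the trailing run,
-- then a rebuild by filtering; objective: alternative decomposition (same O(n) cost).

-- ===== PORT A =====
-- inner `while j < n and norm[j] == " "` loop of A
def pvSkipA (cs : List Char) (n j : Nat) : Nat :=
  if j < n ∧ cs.getD j ' ' == ' ' then pvSkipA cs n (j + 1) else j
termination_by n - j
decreasing_by omega

-- cited by pvALoop's decreasing_by (termination of the outer loop at `i = j; continue`)
theorem pvSkipA_ge (cs : List Char) (n : Nat) : ∀ j, j ≤ pvSkipA cs n j := by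
  intro j
  fun_induction pvSkipA <;> omega

-- outer `while i < n` loop of A, carrying the accumulators `out` and `omap`
def pvALoop (cs : List Char) (pm : List Int) (n i : Nat) (out : List Char) (omap : List Int) :
    List Char × List Int :=
  if i < n then
    if i + 1 < n ∧ cs.getD i ' ' == '(' ∧ cs.getD (i + 1) ' ' == ' ' then
      if pvSkipA cs n (i + 1) < n then
        pvALoop cs pm n (pvSkipA cs n (i + 1)) (out ++ ['(']) (omap ++ [pm.getD i 0])
      else
        pvALoop cs pm n (i + 1) (out ++ [cs.getD i ' ']) (omap ++ [pm.getD i 0])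
    else
      pvALoop cs pm n (i + 1) (out ++ [cs.getD i ' ']) (omap ++ [pm.getD i 0])
  else (out, omap)
termination_by n - i
decreasing_by
  · have := pvSkipA_ge cs n (i + 1); omega
  · omega
  · omega

def drop_inline_paren_gaps_py (norm : String) (pos_map : List Int) : String × List Int :=
  let cs := norm.toList
  let r := pvALoop cs pos_map cs.length 0 [] []
  (String.mk r.1, r.2)

-- ===== PORT B =====
-- forward pass: d = (c == ' ') and (prev_c == '(' or prev_d)
def pvFwd (prevC : Char) (prevD : Bool) : List Char → List Bool
  | [] => []
  | c :: rest => ((c == ' ') && (prevC == '(' || prevD)) ::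
      pvFwd c ((c == ' ') && (prevC == '(' || prevD)) rest

-- backward trim: `while t > 0 and norm[t-1] == " ": t -= 1`
def pvFindT (cs : List Char) : Nat → Nat
  | 0 => 0
  | t + 1 => if cs.getD t ' ' == ' ' then pvFindT cs t else t + 1

def drop_inline_paren_gaps_py_alt (norm : String) (pos_map : List Int) : String × List Int :=
  let cs := norm.toList
  let n := cs.length
  let fwd := pvFwd '\x00' false cs
  let t := pvFindT cs n
  let drop := (List.range n).map (fun k => fwd.getD k false && decide (k < t))
  (String.mk (((List.range n).filter (fun k => !(drop.getD k false))).map (fun k => cs.getD k ' ')),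
   ((List.range n).filter (fun k => !(drop.getD k false))).map (fun k => pos_map.getD k 0))

-- ===== PRECONDITION & SPEC =====
-- Python A indexes pos_map[i] for kept indices up to len(norm)-1, so it raises IndexError
-- whenever pos_map is shorter than norm; Pre_ admits exactly the inputs where A returns.
def Pre_drop_inline_paren_gaps_py (norm : String) (pos_map : List Int) : Prop :=
  norm.length ≤ pos_map.length
instance (norm : String) (pos_map : List Int) : Decidable (Pre_drop_inline_paren_gaps_py norm pos_map) := by
  unfold Pre_drop_inline_paren_gaps_py; infer_instance

def pvWitness_drop_inline_paren_gaps_py : String × List Int := ("(  a b", [0, 1, 2, 3, 4, 5])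

def Spec_drop_inline_paren_gaps_py (norm : String) (pos_map : List Int) (out : String × List Int) : Prop :=
  out = drop_inline_paren_gaps_py_alt norm pos_map
instance (norm : String) (pos_map : List Int) (out : String × List Int) :
    Decidable (Spec_drop_inline_paren_gaps_py norm pos_map out) := by
  unfold Spec_drop_inline_paren_gaps_py; infer_instance

-- ===== CLAIM (what is proved, stated in full; the proofs are below) =====
def Claim_equal_drop_inline_paren_gaps_py : Prop := ∀ (norm : String) (pos_map : List Int), Dom_drop_inline_paren_gaps_py norm pos_map → Pre_drop_inline_paren_gaps_py norm pos_map → Spec_drop_inline_paren_gaps_py norm pos_map (drop_inline_paren_gaps_py norm pos_map)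

-- ===== LEMMAS AND PROOFS =====

-- index-form of the forward DP (default 'x' makes out-of-range indices non-space)
def pvDropF (cs : List Char) : Nat → Bool
  | 0 => false
  | k + 1 => (cs.getD (k + 1) 'x' == ' ') && ((cs.getD k 'x' == '(') || pvDropF cs k)

def pvKeep (cs : List Char) (k : Nat) : Bool :=
  !(pvDropF cs k && decide (k < pvFindT cs cs.length))

def pvIdxs (cs : List Char) (i : Nat) : List Nat :=
  (List.range' i (cs.length - i)).filter (pvKeep cs)

theorem pvGetD_irrel {cs : List Char} {k : Nat} (h : k < cs.length) (a b : Char) :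
    cs.getD k a = cs.getD k b := by
  simp [List.getD_eq_getElem?_getD, List.getElem?_eq_getElem h]

theorem pvFwd_head (r : List Char) (c : Char) (d : Bool) :
    (pvFwd c d r).getD 0 false = ((r.getD 0 'x' == ' ') && ((c == '(') || d)) := by
  cases r <;> simp [pvFwd]

theorem pvFwd_step : ∀ (cs : List Char) (p : Char) (b : Bool) (k : Nat),
    (pvFwd p b cs).getD (k + 1) false =
      ((cs.getD (k + 1) 'x' == ' ') && ((cs.getD k 'x' == '(') || (pvFwd p b cs).getD k false)) := by
  intro cs
  induction cs with
  | nil => intro p b k; simp [pvFwd]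
  | cons c r ih =>
    intro p b k
    cases k with
    | zero =>
      simp only [pvFwd, List.getD_cons_succ, List.getD_cons_zero, pvFwd_head]
    | succ m =>
      simp only [pvFwd, List.getD_cons_succ]
      exact ih c _ m

theorem pvFwd_eq_dropF (cs : List Char) : ∀ k, (pvFwd '\x00' false cs).getD k false = pvDropF cs k := by
  intro k
  induction k with
  | zero => rw [pvFwd_head]; simp [pvDropF]
  | succ m ih => rw [pvFwd_step, ih, pvDropF]

theorem pvFindT_le (cs : List Char) : ∀ t, pvFindT cs t ≤ t := by
  intro t
  induction t with
  | zero => simp [pvFindT]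
  | succ m ih => rw [pvFindT]; split <;> omega

theorem pvFindT_space (cs : List Char) : ∀ t k, pvFindT cs t ≤ k → k < t → cs.getD k ' ' = ' ' := by
  intro t
  induction t with
  | zero => omega
  | succ m ih =>
    intro k hk hkt
    rw [pvFindT] at hk
    split at hk
    · rcases Nat.lt_or_ge k m with h | h
      · exact ih k hk h
      · have : k = m := by omega
        subst this
        simp_all
    · omega

theorem pvFindT_boundary (cs : List Char) :
    ∀ t, pvFindT cs t = 0 ∨ cs.getD (pvFindT cs t - 1) ' ' ≠ ' ' := by
  intro t
  induction t with
  | zero => left; rfl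
  | succ m ih =>
    rw [pvFindT]
    split
    · exact ih
    · right; simpa using (by assumption : ¬ (cs.getD m ' ' == ' ') = true)

-- if every index from i on is a space, the trailing-run start is ≤ i
theorem pvT_le_of_suffix {cs : List Char} {i : Nat}
    (hs : ∀ m, i ≤ m → m < cs.length → cs.getD m ' ' = ' ') : pvFindT cs cs.length ≤ i := by
  by_contra h
  have hTle := pvFindT_le cs cs.length
  rcases pvFindT_boundary cs cs.length with h0 | hb
  · omega
  · exact hb (hs _ (by omega) (by omega))

-- pvSkipA characterisation
theorem pvSkipA_le (cs : List Char) (n : Nat) : ∀ j, j ≤ n → pvSkipA cs n j ≤ n := by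
  intro j
  fun_induction pvSkipA <;> omega

theorem pvSkipA_space (cs : List Char) (n : Nat) :
    ∀ j m, j ≤ m → m < pvSkipA cs n j → cs.getD m ' ' = ' ' := by
  intro j
  fun_induction pvSkipA with
  | case1 j h ih =>
    intro m hm hm2
    rcases Nat.lt_or_ge m (j + 1) with h1 | h1
    · have : m = j := by omega
      subst this
      simpa using h.2
    · exact ih m h1 hm2
  | case2 j h => omega

theorem pvSkipA_stop (cs : List Char) (n : Nat) :
    ∀ j, pvSkipA cs n j < n → cs.getD (pvSkipA cs n j) ' ' ≠ ' ' := by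
  intro j
  fun_induction pvSkipA with
  | case1 j h ih => exact ih
  | case2 j h =>
    intro hn
    simp only [not_and_or] at h
    rcases h with h | h
    · omega
    · simpa using h

-- all spaces of a run that starts right after '(' and ends before a non-space get dropped
theorem pvDropF_run {cs : List Char} {i j : Nat} (hi : cs.getD i ' ' = '(')
    (hin : i < cs.length) (hjn : j ≤ cs.length)
    (hsp : ∀ m, i + 1 ≤ m → m < j → cs.getD m ' ' = ' ') :
    ∀ t, i + 1 ≤ t → t < j → pvDropF cs t = true := by
  intro t
  induction t with
  | zero => omega
  | succ s ihs =>
    intro h1 h2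
    have hs1 : cs.getD (s + 1) 'x' = ' ' := by
      rw [pvGetD_irrel (by omega) 'x' ' ']; exact hsp _ h1 h2
    rcases Nat.lt_or_ge i s with hlt | hge
    · have hds := ihs (by omega) (by omega)
      simp only [pvDropF, hs1, hds]
      simp
    · have : s = i := by omega
      subst this
      have hpar : cs.getD s 'x' = '(' := by rw [pvGetD_irrel hin 'x' ' ']; exact hi
      simp only [pvDropF, hs1, hpar]
      simp

-- decomposition of the kept-index list across a step of A's loop
theorem pvIdxs_decompose {cs : List Char} {i j : Nat} (hij : i < j) (hjn : j ≤ cs.length)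
    (hki : pvKeep cs i = true) (hmid : ∀ t, i < t → t < j → pvKeep cs t = false) :
    pvIdxs cs i = i :: pvIdxs cs j := by
  unfold pvIdxs
  have h1 : cs.length - i = (j - i - 1 + (cs.length - j)) + 1 := by omega
  rw [h1, List.range'_succ, List.filter_cons_of_pos hki]
  congr 1
  have h2 : List.range' (i + 1) (j - i - 1) ++ List.range' j (cs.length - j)
      = List.range' (i + 1) (j - i - 1 + (cs.length - j)) := by
    have h := @List.range'_append (i + 1) (j - i - 1) (cs.length - j) 1
    rw [show i + 1 + 1 * (j - i - 1) = j by omega] at h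
    exact h
  rw [← h2, List.filter_append]
  have h3 : (List.range' (i + 1) (j - i - 1)).filter (pvKeep cs) = [] := by
    apply List.filter_eq_nil_iff.mpr
    intro t ht
    rw [List.mem_range'] at ht
    simp [hmid t (by omega) (by omega)]
  simp [h3]

-- the main invariant of A's loop: it appends exactly the kept indices from i on
theorem pvALoop_eq (cs : List Char) (pm : List Int) :
    ∀ (d i : Nat), cs.length - i = d → (i < cs.length → pvKeep cs i = true) →
    ∀ out omap, pvALoop cs pm cs.length i out omap =
      (out ++ (pvIdxs cs i).map (fun k => cs.getD k ' '),
       omap ++ (pvIdxs cs i).map (fun k => pm.getD k 0)) := by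
  intro d
  induction d using Nat.strong_induction_on with
  | _ d ih =>
    intro i hd hkeep out omap
    rw [pvALoop]
    by_cases hin : i < cs.length
    · simp only [if_pos hin]
      have hki := hkeep hin
      split
      · next hg =>
        obtain ⟨hg1, hg2, hg3⟩ := hg
        have hgi : cs.getD i ' ' = '(' := by simpa using hg2
        have hj_ge := pvSkipA_ge cs cs.length (i + 1)
        have hj_le := pvSkipA_le cs cs.length (i + 1) (by omega)
        have hj_sp := pvSkipA_space cs cs.length (i + 1)
        split
        · next hjlt =>
          -- run ends before end-of-string: '(' kept, run dropped, jump to j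
          have hjns := pvSkipA_stop cs cs.length (i + 1) hjlt
          have hkj : pvKeep cs (pvSkipA cs cs.length (i + 1)) = true := by
            unfold pvKeep
            cases hc : pvSkipA cs cs.length (i + 1) with
            | zero => simp [pvDropF]
            | succ s =>
              have hb : (cs.getD (s + 1) 'x' == ' ') = false := by
                apply beq_eq_false_iff_ne.mpr
                rw [pvGetD_irrel (by omega) 'x' ' ']; rw [← hc]; exact hjns
              simp only [pvDropF, hb]
              simp
          have hdec : pvIdxs cs i = i :: pvIdxs cs (pvSkipA cs cs.length (i + 1)) := by
            apply pvIdxs_decompose (by omega) hj_le hki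
            intro t ht1 ht2
            have hDt : pvDropF cs t = true :=
              pvDropF_run hgi hin hj_le (fun m h1 h2 => hj_sp m h1 h2) t (by omega) ht2
            have hTt : t < pvFindT cs cs.length := by
              by_contra h
              exact hjns (pvFindT_space cs cs.length _ (by omega) hjlt)
            simp [pvKeep, hDt, hTt]
          rw [ih _ (by omega) _ rfl (fun _ => hkj)]
          have hgi' : cs[i]?.getD ' ' = '(' := by
            rw [← List.getD_eq_getElem?_getD]; exact hgi
          simp [hdec, hgi']
        · next hjge =>
          -- run reaches end-of-string: nothing dropped here
          have hjn : pvSkipA cs cs.length (i + 1) = cs.length := by omega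
          have hsuf : ∀ m, i + 1 ≤ m → m < cs.length → cs.getD m ' ' = ' ' := by
            intro m h1 h2
            exact hj_sp m h1 (by omega)
          have hTle : pvFindT cs cs.length ≤ i + 1 := pvT_le_of_suffix hsuf
          have hk1 : pvKeep cs (i + 1) = true := by
            simp [pvKeep, show ¬ (i + 1 < pvFindT cs cs.length) by omega]
          have hdec : pvIdxs cs i = i :: pvIdxs cs (i + 1) := by
            apply pvIdxs_decompose (by omega) (by omega) hki
            intro t ht1 ht2; omega
          rw [ih _ (by omega) _ rfl (fun _ => hk1)]
          simp [hdec]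
      · next hg =>
        have hk1 : i + 1 < cs.length → pvKeep cs (i + 1) = true := by
          intro h1
          by_cases hsp : cs.getD (i + 1) ' ' = ' '
          · have hnp : cs.getD i ' ' ≠ '(' := by
              intro hp
              exact hg ⟨h1, by simpa using hp, by simpa using hsp⟩
            have hnp' : (cs.getD i 'x' == '(') = false := by
              rw [pvGetD_irrel hin 'x' ' ']
              exact beq_eq_false_iff_ne.mpr hnp
            by_cases hDi : pvDropF cs i = true
            · have hTi : ¬ (i < pvFindT cs cs.length) := by
                intro h
                simp [pvKeep, hDi, h] at hki
              simp only [pvKeep]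
              simp [show ¬ (i + 1 < pvFindT cs cs.length) by omega]
            · have hDi' : pvDropF cs i = false := by
                simpa using hDi
              simp only [pvKeep, pvDropF, hnp', hDi']
              simp
          · have hb : (cs.getD (i + 1) 'x' == ' ') = false := by
              apply beq_eq_false_iff_ne.mpr
              rw [pvGetD_irrel h1 'x' ' ']; exact hsp
            simp only [pvKeep, pvDropF, hb]
            simp
        have hdec : pvIdxs cs i = i :: pvIdxs cs (i + 1) := by
          apply pvIdxs_decompose (by omega) (by omega) hki
          intro t ht1 ht2; omega
        rw [ih _ (by omega) _ rfl hk1]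
        simp [hdec]
    · simp only [if_neg hin]
      have : cs.length - i = 0 := by omega
      simp [pvIdxs, this]

theorem pvAlt_eq (norm : String) (pm : List Int) :
    drop_inline_paren_gaps_py_alt norm pm =
      (String.mk ((pvIdxs norm.toList 0).map (fun k => norm.toList.getD k ' ')),
       (pvIdxs norm.toList 0).map (fun k => pm.getD k 0)) := by
  unfold drop_inline_paren_gaps_py_alt
  dsimp only
  have hfilter : (List.range norm.toList.length).filter
      (fun k => !(((List.range norm.toList.length).map
        (fun k => (pvFwd '\x00' false norm.toList).getD k false &&
          decide (k < pvFindT norm.toList norm.toList.length))).getD k false))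
      = pvIdxs norm.toList 0 := by
    unfold pvIdxs
    rw [show List.range' 0 (norm.toList.length - 0) = List.range norm.toList.length by
      simp [List.range_eq_range']]
    apply List.filter_congr
    intro k hk
    rw [List.mem_range] at hk
    have hmap : ((List.range norm.toList.length).map
        (fun k => (pvFwd '\x00' false norm.toList).getD k false &&
          decide (k < pvFindT norm.toList norm.toList.length))).getD k false
        = ((pvFwd '\x00' false norm.toList).getD k false &&
          decide (k < pvFindT norm.toList norm.toList.length)) := by
      rw [List.getD_eq_getElem?_getD, List.getElem?_map, List.getElem?_range hk]
      rfl
    rw [hmap, pvFwd_eq_dropF]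
    rfl
  rw [hfilter]

-- ===== VERDICT (by name: the statement is the Claim_ definition above) =====
theorem drop_inline_paren_gaps_py_spec : Claim_equal_drop_inline_paren_gaps_py := by
  intro norm pos_map _hdom _hpre
  unfold Spec_drop_inline_paren_gaps_py drop_inline_paren_gaps_py
  dsimp only
  rw [pvALoop_eq norm.toList pos_map (norm.toList.length - 0) 0 rfl
    (fun _ => by simp [pvKeep, pvDropF]), pvAlt_eq]
  simp
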